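-- pv_equiv track=rewrite | github.com/AdamZhouSE/pythonHomework | Code/CodeRecords/2372/60675/283795.py | func
-- ===== SOURCE A (Python) =====
-- def func(l1:list, l2:list, o:int, o1:int, o2:int) -> int:
--     init = [[0] * (o + 1) for i in range(o + 1)]
--     for i in range(1, o + 1):
--         init[0][i] = init[0][i - 1] + l2[i - 1]
--         init[i][0] = init[i - 1][0] + l1[i - 1]
--     for m in range(1, o + 1):
--         for n in range(1, o + 1):
--             if m + n <= o:
--                 init[m][n] = max(init[m][n - 1] + l2[m + n - 1], init[m - 1][n] + l1[m + n - 1])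
--             else:
--                 init[m][n] = max(init[m - 1][n], init[m][n - 1])
--     return init[-1][-1]
-- ===== SOURCE B (Python) =====
-- def func(l1: list, l2: list, o: int, o1: int, o2: int) -> int:
--     total = 0
--     k = o
--     while k:
--         total += max(l1[k - 1], l2[k - 1])
--         k -= 1
--     return total
-- ===== Notes on version B (the rewrite author's own statement) =====
-- stated objective: faster
-- what changed: Replaced the (o+1)x(o+1) DP table with a single O(o) count-down loop summing max(l1[k-1], l2[k-1]): at step k the pick costs l1[k-1] or l2[k-1] regardless of which pile it is charged to, so the DP value collapses to the sum of the pointwise maxima.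
import Mathlib
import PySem

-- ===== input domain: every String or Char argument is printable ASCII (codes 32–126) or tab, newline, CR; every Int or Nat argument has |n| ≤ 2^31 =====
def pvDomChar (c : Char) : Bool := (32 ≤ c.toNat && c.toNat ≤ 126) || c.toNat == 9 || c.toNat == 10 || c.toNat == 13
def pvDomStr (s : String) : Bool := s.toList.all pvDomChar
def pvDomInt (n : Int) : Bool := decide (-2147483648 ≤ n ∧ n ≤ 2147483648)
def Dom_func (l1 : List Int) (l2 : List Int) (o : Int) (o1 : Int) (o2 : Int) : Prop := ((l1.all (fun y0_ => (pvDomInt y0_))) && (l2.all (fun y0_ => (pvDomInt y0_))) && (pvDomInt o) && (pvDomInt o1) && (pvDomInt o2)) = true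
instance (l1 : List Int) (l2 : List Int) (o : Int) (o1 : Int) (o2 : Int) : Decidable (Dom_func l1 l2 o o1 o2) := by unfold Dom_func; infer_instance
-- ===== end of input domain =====

-- B replaces A's (o+1)×(o+1) DP table with one O(o) pass summing max(l1[i],l2[i]) (proved equal; return-value equivalence, A mutates only its local table).

-- ===== PORT A =====
-- init[i][j] read: Python list-of-lists indexing (pyGetD is exact inside Pre_, where every index is in range)
def pvGet (t : List (List Int)) (i j : Int) : Int :=
  PySem.List.pyGetD (PySem.List.pyGetD t i []) j 0

-- init[i][j] = v : replace row i by its updated copy (exact inside Pre_)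
def pvSet (t : List (List Int)) (i j : Int) (v : Int) : List (List Int) :=
  PySem.List.pySetD t i (PySem.List.pySetD (PySem.List.pyGetD t i []) j v)

-- body of the first loop: init[0][i] = init[0][i-1] + l2[i-1]; init[i][0] = init[i-1][0] + l1[i-1]
def pvStep1 (l1 l2 : List Int) (t : List (List Int)) (i : Int) : List (List Int) :=
  let t' := pvSet t 0 i (pvGet t 0 (i-1) + PySem.List.pyGetD l2 (i-1) 0)
  pvSet t' i 0 (pvGet t' (i-1) 0 + PySem.List.pyGetD l1 (i-1) 0)

-- body of the inner loop of the second (nested) loop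
def pvStep2i (l1 l2 : List Int) (o : Int) (m : Int) (t : List (List Int)) (n : Int) : List (List Int) :=
  if m + n ≤ o then
    pvSet t m n (max (pvGet t m (n-1) + PySem.List.pyGetD l2 (m+n-1) 0)
                     (pvGet t (m-1) n + PySem.List.pyGetD l1 (m+n-1) 0))
  else
    pvSet t m n (max (pvGet t (m-1) n) (pvGet t m (n-1)))

-- body of the outer loop of the second (nested) loop
def pvStep2 (l1 l2 : List Int) (o : Int) (t : List (List Int)) (m : Int) : List (List Int) :=
  (PySem.List.pyRange 1 (o+1) 1).foldl (pvStep2i l1 l2 o m) t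

def func (l1 : List Int) (l2 : List Int) (o : Int) (o1 : Int) (o2 : Int) : Int :=
  let init0 : List (List Int) :=
    (PySem.List.pyRange 0 (o+1) 1).map (fun _ => List.replicate (o+1).toNat (0:Int))
  let t1 := (PySem.List.pyRange 1 (o+1) 1).foldl (pvStep1 l1 l2) init0
  let t2 := (PySem.List.pyRange 1 (o+1) 1).foldl (pvStep2 l1 l2 o) t1
  pvGet t2 (-1) (-1)

-- ===== PORT B =====
-- the 'while k:' loop of Source B: the Nat counter k counts the remaining iterations; Python B
-- raises (IndexError, exactly where A raises) for k < 0 or k past the lists, so o.toNat and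
-- the pyGetD defaults are never reached on Pre_ (outside Pre_ nothing is claimed)
def altGo (l1 l2 : List Int) (total : Int) : Nat → Int
  | 0 => total
  | k+1 => altGo l1 l2
      (total + max (PySem.List.pyGetD l1 ((k:Int)+1-1) 0) (PySem.List.pyGetD l2 ((k:Int)+1-1) 0)) k

def func_alt (l1 : List Int) (l2 : List Int) (o : Int) (o1 : Int) (o2 : Int) : Int :=
  altGo l1 l2 0 o.toNat

-- ===== PRECONDITION & SPEC =====
-- exactly the inputs on which the Python A returns (otherwise it raises IndexError)
def Pre_func (l1 : List Int) (l2 : List Int) (o : Int) (o1 : Int) (o2 : Int) : Prop :=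
  0 ≤ o ∧ o ≤ (l1.length : Int) ∧ o ≤ (l2.length : Int)
instance (l1 : List Int) (l2 : List Int) (o : Int) (o1 : Int) (o2 : Int) : Decidable (Pre_func l1 l2 o o1 o2) := by unfold Pre_func; infer_instance

def pvWitness_func : List Int × List Int × Int × Int × Int := ([1, 5], [2, 3], 2, 0, 0)

def Spec_func (l1 : List Int) (l2 : List Int) (o : Int) (o1 : Int) (o2 : Int) (out : Int) : Prop := out = func_alt l1 l2 o o1 o2
instance (l1 : List Int) (l2 : List Int) (o : Int) (o1 : Int) (o2 : Int) (out : Int) : Decidable (Spec_func l1 l2 o o1 o2 out) := by unfold Spec_func; infer_instance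

-- ===== CLAIM (what is proved, stated in full; the proofs are below) =====
def Claim_equal_func : Prop := ∀ (l1 : List Int) (l2 : List Int) (o : Int) (o1 : Int) (o2 : Int), Dom_func l1 l2 o o1 o2 → Pre_func l1 l2 o o1 o2 → Spec_func l1 l2 o o1 o2 (func l1 l2 o o1 o2)


-- ===== LEMMAS AND PROOFS =====

-- pure-Nat view of the table
def tabGet (t : List (List Int)) (i j : Nat) : Int := (t.getD i []).getD j 0
def tabSet (t : List (List Int)) (i j : Nat) (v : Int) : List (List Int) :=
  t.set i ((t.getD i []).set j v)

-- the DP value of A's table, as a recursive function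
def T0 (l2 : List Int) : Nat → Int
  | 0 => 0
  | n+1 => T0 l2 n + l2.getD n 0

def Trow (l1 l2 : List Int) (N : Nat) (prev : Nat → Int) (m : Nat) : Nat → Int
  | 0 => prev 0 + l1.getD m 0
  | n+1 => if m + n + 2 ≤ N then
             max (Trow l1 l2 N prev m n + l2.getD (m+n+1) 0) (prev (n+1) + l1.getD (m+n+1) 0)
           else max (prev (n+1)) (Trow l1 l2 N prev m n)

def T (l1 l2 : List Int) (N : Nat) : Nat → Nat → Int
  | 0 => T0 l2
  | m+1 => Trow l1 l2 N (T l1 l2 N m) m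

-- the closed form: sum of pointwise maxima
def S (l1 l2 : List Int) : Nat → Int
  | 0 => 0
  | k+1 => S l1 l2 k + max (l1.getD k 0) (l2.getD k 0)

-- greedy count of steps charged to l1
def G (l1 l2 : List Int) : Nat → Nat
  | 0 => 0
  | k+1 => G l1 l2 k + (if l2.getD k 0 ≤ l1.getD k 0 then 1 else 0)

lemma T_succ_succ (l1 l2 : List Int) (N m n : Nat) :
    T l1 l2 N (m+1) (n+1) =
      if m + n + 2 ≤ N then
        max (T l1 l2 N (m+1) n + l2.getD (m+n+1) 0) (T l1 l2 N m (n+1) + l1.getD (m+n+1) 0)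
      else max (T l1 l2 N m (n+1)) (T l1 l2 N (m+1) n) := rfl

lemma T_zero (l1 l2 : List Int) (N : Nat) (n : Nat) : T l1 l2 N 0 n = T0 l2 n := rfl

lemma G_succ (l1 l2 : List Int) (k : Nat) :
    G l1 l2 (k+1) = G l1 l2 k + (if l2.getD k 0 ≤ l1.getD k 0 then 1 else 0) := rfl

lemma S_succ (l1 l2 : List Int) (k : Nat) :
    S l1 l2 (k+1) = S l1 l2 k + max (l1.getD k 0) (l2.getD k 0) := rfl

lemma T0_le_S (l1 l2 : List Int) (n : Nat) : T0 l2 n ≤ S l1 l2 n := by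
  induction n with
  | zero => simp [T0, S]
  | succ n ih =>
    unfold T0 S
    have := le_max_right (l1.getD n 0) (l2.getD n 0)
    omega

lemma T_succ_zero (l1 l2 : List Int) (N m : Nat) :
    T l1 l2 N (m+1) 0 = T l1 l2 N m 0 + l1.getD m 0 := rfl

lemma G_le (l1 l2 : List Int) (k : Nat) : G l1 l2 k ≤ k := by
  induction k with
  | zero => simp [G]
  | succ k ih => unfold G; split_ifs <;> omega

lemma T_le_S (l1 l2 : List Int) (N : Nat) :
    ∀ m n, m + n ≤ N → T l1 l2 N m n ≤ S l1 l2 (m + n) := by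
  intro m
  induction m with
  | zero => intro n _; rw [T_zero]; simpa using T0_le_S l1 l2 n
  | succ m ihm =>
    intro n
    induction n with
    | zero =>
      intro h
      rw [T_succ_zero]
      have h1 := ihm 0 (by omega)
      have h2 := le_max_left (l1.getD m 0) (l2.getD m 0)
      have : S l1 l2 (m+1+0) = S l1 l2 (m+0) + max (l1.getD m 0) (l2.getD m 0) := by
        simp [S]
      omega
    | succ n ihn =>
      intro h
      rw [T_succ_succ, if_pos (by omega)]
      have hA : T l1 l2 N (m+1) n ≤ S l1 l2 (m+1+n) := ihn (by omega)
      have hB : T l1 l2 N m (n+1) ≤ S l1 l2 (m+(n+1)) := ihm (n+1) (by omega)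
      have hS : S l1 l2 (m+1+(n+1)) = S l1 l2 (m+n+1) + max (l1.getD (m+n+1) 0) (l2.getD (m+n+1) 0) := by
        have : m+1+(n+1) = (m+n+1)+1 := by omega
        rw [this]; rfl
      have e1 : m+1+n = m+n+1 := by omega
      have e2 : m+(n+1) = m+n+1 := by omega
      rw [e1] at hA; rw [e2] at hB
      have h1 := le_max_left (l1.getD (m+n+1) 0) (l2.getD (m+n+1) 0)
      have h2 := le_max_right (l1.getD (m+n+1) 0) (l2.getD (m+n+1) 0)
      have := max_le (by omega : T l1 l2 N (m+1) n + l2.getD (m+n+1) 0 ≤ S l1 l2 (m+1+(n+1)))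
        (by omega : T l1 l2 N m (n+1) + l1.getD (m+n+1) 0 ≤ S l1 l2 (m+1+(n+1)))
      exact this

lemma S_le_T_greedy (l1 l2 : List Int) (N : Nat) :
    ∀ k, k ≤ N → S l1 l2 k ≤ T l1 l2 N (G l1 l2 k) (k - G l1 l2 k) := by
  intro k
  induction k with
  | zero => intro _; simp [S, G, T, T0]
  | succ k ih =>
    intro hk
    have hkN : k ≤ N := by omega
    have hg := G_le l1 l2 k
    have ihk := ih hkN
    by_cases hc : l2.getD k 0 ≤ l1.getD k 0
    · have hG : G l1 l2 (k+1) = G l1 l2 k + 1 := by rw [G_succ, if_pos hc]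
      rw [hG]
      have hsub : k + 1 - (G l1 l2 k + 1) = k - G l1 l2 k := by omega
      rw [hsub]
      have hS : S l1 l2 (k+1) = S l1 l2 k + l1.getD k 0 := by
        rw [S_succ, max_eq_left hc]
      rw [hS]
      rcases Nat.eq_zero_or_eq_succ_pred (k - G l1 l2 k) with h0 | hsucc
      · -- k = G k
        have hkg : k = G l1 l2 k := by omega
        rw [h0, T_succ_zero]
        have : l1.getD (G l1 l2 k) 0 = l1.getD k 0 := by rw [← hkg]
        rw [this]
        have := ihk; rw [h0] at this
        omega
      · set p := (k - G l1 l2 k) - 1 with hp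
        have hnp : k - G l1 l2 k = p + 1 := by omega
        rw [hnp, T_succ_succ, if_pos (by omega)]
        have hidx : G l1 l2 k + p + 1 = k := by omega
        rw [hidx]
        have := ihk; rw [hnp] at this
        have hle := le_max_right (T l1 l2 N (G l1 l2 k + 1) p + l2.getD k 0)
          (T l1 l2 N (G l1 l2 k) (p+1) + l1.getD k 0)
        omega
    · have hG : G l1 l2 (k+1) = G l1 l2 k := by rw [G_succ, if_neg hc]; omega
      rw [hG]
      have hsub : k + 1 - G l1 l2 k = (k - G l1 l2 k) + 1 := by omega
      rw [hsub]
      have hS : S l1 l2 (k+1) = S l1 l2 k + l2.getD k 0 := by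
        rw [S_succ, max_eq_right (not_le.mp hc).le]
      rw [hS]
      rcases Nat.eq_zero_or_eq_succ_pred (G l1 l2 k) with h0 | hsucc
      · rw [h0]
        rw [h0] at ihk
        have hkg : k - 0 = k := by omega
        rw [hkg] at ihk ⊢
        rw [T_zero] at ihk ⊢
        have : T0 l2 (k+1) = T0 l2 k + l2.getD k 0 := rfl
        omega
      · set q := G l1 l2 k - 1 with hq
        have hgq : G l1 l2 k = q + 1 := by omega
        rw [hgq, T_succ_succ, if_pos (by omega)]
        have hidx : q + (k - (q+1)) + 1 = k := by omega
        rw [hidx]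
        have := ihk; rw [hgq] at this
        have hle := le_max_left (T l1 l2 N (q+1) (k - (q+1)) + l2.getD k 0)
          (T l1 l2 N q (k - (q+1) + 1) + l1.getD k 0)
        omega

lemma T_le_S_upper (l1 l2 : List Int) (N : Nat) :
    ∀ d m n, m ≤ N → n ≤ N → m + n = N + d → T l1 l2 N m n ≤ S l1 l2 N := by
  intro d
  induction d with
  | zero =>
    intro m n hm hn hmn
    have := T_le_S l1 l2 N m n (by omega)
    rw [hmn] at this
    simpa using this
  | succ d ih =>
    intro m n hm hn hmn
    have hm1 : 1 ≤ m := by omega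
    have hn1 : 1 ≤ n := by omega
    obtain ⟨m', rfl⟩ : ∃ m', m = m' + 1 := ⟨m - 1, by omega⟩
    obtain ⟨n', rfl⟩ : ∃ n', n = n' + 1 := ⟨n - 1, by omega⟩
    rw [T_succ_succ, if_neg (by omega)]
    exact max_le (ih m' (n'+1) (by omega) (by omega) (by omega))
      (ih (m'+1) n' (by omega) (by omega) (by omega))

lemma T_mono_m (l1 l2 : List Int) (N : Nat) :
    ∀ a m n, m + n = N → 1 ≤ n → T l1 l2 N m n ≤ T l1 l2 N (m + a) n := by
  intro a
  induction a with
  | zero => intro m n _ _; simp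
  | succ a ih =>
    intro m n hmn hn
    obtain ⟨n', rfl⟩ : ∃ n', n = n' + 1 := ⟨n - 1, by omega⟩
    have : m + (a+1) = (m+a) + 1 := by omega
    rw [this, T_succ_succ, if_neg (by omega)]
    exact le_trans (ih m (n'+1) hmn hn) (le_max_left _ _)

lemma T_mono_n (l1 l2 : List Int) (N : Nat) (hN : 1 ≤ N) :
    ∀ b n, T l1 l2 N N n ≤ T l1 l2 N N (n + b) := by
  intro b
  induction b with
  | zero => intro n; simp
  | succ b ih =>
    intro n
    obtain ⟨M, rfl⟩ : ∃ M, N = M + 1 := ⟨N - 1, by omega⟩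
    have : n + (b+1) = (n+b) + 1 := by omega
    rw [this, T_succ_succ, if_neg (by omega)]
    exact le_trans (ih n) (le_max_right _ _)

lemma T_diag_eq_S (l1 l2 : List Int) (N : Nat) : T l1 l2 N N N = S l1 l2 N := by
  apply le_antisymm
  · exact T_le_S_upper l1 l2 N N N N le_rfl le_rfl (by omega)
  · rcases Nat.eq_zero_or_pos N with h0 | hN
    · subst h0; simp [T, T0, S]
    · have hg := G_le l1 l2 N
      have h1 := S_le_T_greedy l1 l2 N N le_rfl
      by_cases hgN : G l1 l2 N = N
      · rw [hgN] at h1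
        have h2 := T_mono_n l1 l2 N hN N 0
        simp only [Nat.zero_add, Nat.sub_self] at h1 h2 ⊢
        omega
      · have hlt : G l1 l2 N < N := by omega
        have h2 := T_mono_m l1 l2 N (N - G l1 l2 N) (G l1 l2 N) (N - G l1 l2 N)
          (by omega) (by omega)
        have e : G l1 l2 N + (N - G l1 l2 N) = N := by omega
        rw [e] at h2
        have h3 := T_mono_n l1 l2 N hN (G l1 l2 N) (N - G l1 l2 N)
        have e2 : N - G l1 l2 N + G l1 l2 N = N := by omega
        rw [e2] at h3
        -- h3 : T N (N - g) ≤ T N N ... wait direction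
        omega

-- table bookkeeping
lemma pvGetD_set {α : Type} (l : List α) (j j' : Nat) (v d : α) :
    (l.set j v).getD j' d = if j' = j ∧ j < l.length then v else l.getD j' d := by
  by_cases hjj : j' = j
  · subst hjj
    by_cases hlt : j' < l.length
    · simp [hlt, List.getD_eq_getElem?_getD, List.getElem?_set]
    · have h1 : (l.set j' v)[j']? = none := List.getElem?_eq_none_iff.2 (by simp; omega)
      have h2 : l[j']? = none := List.getElem?_eq_none_iff.2 (by omega)
      simp [List.getD_eq_getElem?_getD, h1, h2, hlt]
  · simp [hjj, List.getD_eq_getElem?_getD, List.getElem?_set, Ne.symm hjj]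

lemma tabGet_tabSet (t : List (List Int)) (i j i' j' : Nat) (v : Int)
    (hi : i < t.length) :
    tabGet (tabSet t i j v) i' j' =
      if i' = i ∧ j' = j ∧ j < (t.getD i []).length then v else tabGet t i' j' := by
  unfold tabGet tabSet
  rw [pvGetD_set]
  by_cases hii : i' = i
  · subst hii
    rw [if_pos ⟨rfl, hi⟩, pvGetD_set]
    by_cases hc : j' = j ∧ j < (t.getD i' []).length
    · rw [if_pos hc, if_pos ⟨rfl, hc.1, hc.2⟩]
    · rw [if_neg hc, if_neg (by tauto)]
  · rw [if_neg (by tauto), if_neg (by tauto)]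

lemma length_tabSet (t : List (List Int)) (i j : Nat) (v : Int) :
    (tabSet t i j v).length = t.length := by simp [tabSet]

lemma rowlen_tabSet (t : List (List Int)) (i j r : Nat) (v : Int) :
    ((tabSet t i j v).getD r []).length = (t.getD r []).length := by
  unfold tabSet
  rw [pvGetD_set]
  split_ifs with h
  · simp [h.1]
  · rfl

lemma pvGet_natCast (t : List (List Int)) (i j : Nat) :
    pvGet t (i : Int) (j : Int) = tabGet t i j := by
  simp [pvGet, tabGet, PySem.List.pyGetD_natCast]

lemma pvSet_natCast (t : List (List Int)) (i j : Nat) (v : Int) :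
    pvSet t (i : Int) (j : Int) v = tabSet t i j v := by
  simp [pvSet, tabSet, PySem.List.pySetD_natCast, PySem.List.pyGetD_natCast]

lemma pvStep1_natCast (l1 l2 : List Int) (t : List (List Int)) (k : Nat) :
    pvStep1 l1 l2 t ((k:Int)+1) =
      tabSet (tabSet t 0 (k+1) (tabGet t 0 k + l2.getD k 0)) (k+1) 0
        (tabGet (tabSet t 0 (k+1) (tabGet t 0 k + l2.getD k 0)) k 0 + l1.getD k 0) := by
  unfold pvStep1
  have e1 : (k:Int)+1-1 = ((k:Nat):Int) := by ring
  have e2 : (k:Int)+1 = (((k+1:Nat)):Int) := by push_cast; ring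
  rw [e1, e2]
  rw [show ((0:Int)) = ((0:Nat):Int) from rfl]
  rw [pvGet_natCast, pvSet_natCast, pvGet_natCast, pvSet_natCast,
    PySem.List.pyGetD_natCast, PySem.List.pyGetD_natCast]

lemma pvStep2i_natCast (l1 l2 : List Int) (N m n : Nat) (t : List (List Int)) :
    pvStep2i l1 l2 (N:Int) ((m:Int)+1) t ((n:Int)+1) =
      if m + n + 2 ≤ N then
        tabSet t (m+1) (n+1)
          (max (tabGet t (m+1) n + l2.getD (m+n+1) 0) (tabGet t m (n+1) + l1.getD (m+n+1) 0))
      else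
        tabSet t (m+1) (n+1) (max (tabGet t m (n+1)) (tabGet t (m+1) n)) := by
  unfold pvStep2i
  have e1 : ((m:Int)+1)+((n:Int)+1)-1 = (((m+n+1:Nat)):Int) := by push_cast; ring
  have e2 : (n:Int)+1-1 = ((n:Nat):Int) := by ring
  have e3 : (m:Int)+1-1 = ((m:Nat):Int) := by ring
  have e4 : (m:Int)+1 = (((m+1:Nat)):Int) := by push_cast; ring
  have e5 : (n:Int)+1 = (((n+1:Nat)):Int) := by push_cast; ring
  rw [e1, e2, e3]
  by_cases h : m + n + 2 ≤ N
  · rw [if_pos (show (m:Int)+1+((n:Int)+1) ≤ (N:Int) by push_cast; omega), if_pos h,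
      e4, e5, pvGet_natCast, pvGet_natCast, pvSet_natCast,
      PySem.List.pyGetD_natCast, PySem.List.pyGetD_natCast]
  · rw [if_neg (show ¬ ((m:Int)+1+((n:Int)+1) ≤ (N:Int)) by push_cast; omega), if_neg h,
      e4, e5, pvGet_natCast, pvGet_natCast, pvSet_natCast]

-- invariant for the boundary loop
def Inv1 (l1 l2 : List Int) (N k : Nat) (t : List (List Int)) : Prop :=
  t.length = N+1 ∧ (∀ r, (t.getD r []).length = if r < N+1 then N+1 else 0) ∧
  (∀ j, j ≤ k → tabGet t 0 j = T0 l2 j) ∧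
  (∀ i, i ≤ k → tabGet t i 0 = T l1 l2 N i 0)

lemma getD_replicate {α : Type} (n r : Nat) (a d : α) :
    (List.replicate n a).getD r d = if r < n then a else d := by
  rw [List.getD_eq_getElem?_getD, List.getElem?_replicate]
  split_ifs <;> rfl

lemma phase1 (l1 l2 : List Int) (N : Nat) :
    ∀ k, k ≤ N →
      Inv1 l1 l2 N k
        ((PySem.List.pyRange 1 ((k:Int)+1) 1).foldl (pvStep1 l1 l2)
          (List.replicate (N+1) (List.replicate (N+1) (0:Int)))) := by
  intro k
  induction k with
  | zero =>
    intro _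
    rw [show (((0:Nat):Int)+1) = 1 by norm_num, PySem.List.pyRange_one_eq_nil le_rfl]
    refine ⟨by simp, ?_, ?_, ?_⟩
    · intro r
      rw [List.foldl_nil, getD_replicate]
      split_ifs <;> simp
    · intro j hj
      interval_cases j
      simp [tabGet, getD_replicate, T0]
    · intro i hi
      interval_cases i
      simp [tabGet, getD_replicate, T, T0]
  | succ k ih =>
    intro hk
    have hkN : k ≤ N := by omega
    obtain ⟨hlen, hrow, h0j, hi0⟩ := ih hkN
    set t := (PySem.List.pyRange 1 ((k:Int)+1) 1).foldl (pvStep1 l1 l2)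
      (List.replicate (N+1) (List.replicate (N+1) (0:Int))) with hts
    have hpeel : PySem.List.pyRange 1 (((k+1:Nat):Int)+1) 1
        = PySem.List.pyRange 1 ((k:Int)+1) 1 ++ [(k:Int)+1] := by
      rw [show (((k+1:Nat):Int)+1) = ((k:Int)+1)+1 by push_cast; ring]
      exact PySem.List.pyRange_one_succ_right (by omega)
    rw [hpeel, List.foldl_append, List.foldl_cons, List.foldl_nil, ← hts, pvStep1_natCast]
    have hlen1 : (tabSet t 0 (k+1) (tabGet t 0 k + l2.getD k 0)).length = N+1 := by
      rw [length_tabSet, hlen]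
    have hrow1 : ∀ r, ((tabSet t 0 (k+1) (tabGet t 0 k + l2.getD k 0)).getD r []).length
        = if r < N+1 then N+1 else 0 := by
      intro r; rw [rowlen_tabSet]; exact hrow r
    have hrow0 : (t.getD 0 []).length = N+1 := by rw [hrow 0, if_pos (by omega)]
    refine ⟨by rw [length_tabSet, hlen1], ?_, ?_, ?_⟩
    · intro r; rw [rowlen_tabSet]; exact hrow1 r
    · intro j hj
      rw [tabGet_tabSet _ _ _ _ _ _ (by omega)]
      rw [if_neg (by omega)]
      rw [tabGet_tabSet _ _ _ _ _ _ (by omega)]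
      by_cases hjk : j = k+1
      · subst hjk
        rw [if_pos ⟨rfl, rfl, by rw [hrow0]; omega⟩]
        rw [h0j k le_rfl]
        rfl
      · rw [if_neg (by tauto)]
        exact h0j j (by omega)
    · intro i hi
      rw [tabGet_tabSet _ _ _ _ _ _ (by omega)]
      by_cases hik : i = k+1
      · subst hik
        rw [if_pos ⟨rfl, rfl, by rw [hrow1 (k+1), if_pos (by omega)]; omega⟩]
        rw [tabGet_tabSet _ _ _ _ _ _ (by omega), if_neg (by omega)]
        rw [hi0 k le_rfl]
        exact (T_succ_zero l1 l2 N k).symm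
      · rw [if_neg (by tauto)]
        rw [tabGet_tabSet _ _ _ _ _ _ (by omega), if_neg (by omega)]
        exact hi0 i (by omega)

-- invariant for the nested loop: rows 1..m fully computed, boundary intact
def Inv2 (l1 l2 : List Int) (N m : Nat) (t : List (List Int)) : Prop :=
  t.length = N+1 ∧ (∀ r, (t.getD r []).length = if r < N+1 then N+1 else 0) ∧
  (∀ j, j ≤ N → tabGet t 0 j = T0 l2 j) ∧
  (∀ i, i ≤ N → tabGet t i 0 = T l1 l2 N i 0) ∧
  (∀ i, 1 ≤ i → i ≤ m → ∀ j, 1 ≤ j → j ≤ N → tabGet t i j = T l1 l2 N i j)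

lemma phase2_inner (l1 l2 : List Int) (N m : Nat) (hm : m < N) (t : List (List Int))
    (ht : Inv2 l1 l2 N m t) :
    ∀ n, n ≤ N →
      Inv2 l1 l2 N m ((PySem.List.pyRange 1 ((n:Int)+1) 1).foldl (pvStep2i l1 l2 (N:Int) ((m:Int)+1)) t) ∧
      (∀ j, 1 ≤ j → j ≤ n →
        tabGet ((PySem.List.pyRange 1 ((n:Int)+1) 1).foldl (pvStep2i l1 l2 (N:Int) ((m:Int)+1)) t) (m+1) j
          = T l1 l2 N (m+1) j) := by
  intro n
  induction n with
  | zero =>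
    intro _
    rw [show (((0:Nat):Int)+1) = 1 by norm_num, PySem.List.pyRange_one_eq_nil le_rfl]
    exact ⟨ht, fun j hj1 hj0 => by omega⟩
  | succ n ih =>
    intro hn
    obtain ⟨inv', hrowp⟩ := ih (by omega)
    set t' := (PySem.List.pyRange 1 ((n:Int)+1) 1).foldl (pvStep2i l1 l2 (N:Int) ((m:Int)+1)) t with hts
    obtain ⟨hlen, hrow, h0j, hi0, hint⟩ := inv'
    have hpeel : PySem.List.pyRange 1 (((n+1:Nat):Int)+1) 1
        = PySem.List.pyRange 1 ((n:Int)+1) 1 ++ [(n:Int)+1] := by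
      rw [show (((n+1:Nat):Int)+1) = ((n:Int)+1)+1 by push_cast; ring]
      exact PySem.List.pyRange_one_succ_right (by omega)
    rw [hpeel, List.foldl_append, List.foldl_cons, List.foldl_nil, ← hts, pvStep2i_natCast]
    have hread1 : tabGet t' (m+1) n = T l1 l2 N (m+1) n := by
      rcases Nat.eq_zero_or_pos n with h | h
      · subst h; exact hi0 (m+1) (by omega)
      · exact hrowp n h le_rfl
    have hread2 : tabGet t' m (n+1) = T l1 l2 N m (n+1) := by
      rcases Nat.eq_zero_or_pos m with h | h
      · subst h; exact h0j (n+1) (by omega)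
      · exact hint m h le_rfl (n+1) (by omega) (by omega)
    have hrowm1 : (t'.getD (m+1) []).length = N+1 := by rw [hrow (m+1), if_pos (by omega)]
    have hTval : T l1 l2 N (m+1) (n+1) =
        if m + n + 2 ≤ N then
          max (tabGet t' (m+1) n + l2.getD (m+n+1) 0) (tabGet t' m (n+1) + l1.getD (m+n+1) 0)
        else max (tabGet t' m (n+1)) (tabGet t' (m+1) n) := by
      rw [hread1, hread2, T_succ_succ]
    split_ifs with hcond
    all_goals {
      first
      | rw [if_pos hcond] at hTval
      | rw [if_neg hcond] at hTval
      refine ⟨⟨by rw [length_tabSet, hlen], fun r => by rw [rowlen_tabSet]; exact hrow r,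
        ?_, ?_, ?_⟩, ?_⟩
      · intro j hj
        rw [tabGet_tabSet _ _ _ _ _ _ (by omega), if_neg (by omega)]
        exact h0j j hj
      · intro i hi
        rw [tabGet_tabSet _ _ _ _ _ _ (by omega), if_neg (by omega)]
        exact hi0 i hi
      · intro i hi1 hi2 j hj1 hj2
        rw [tabGet_tabSet _ _ _ _ _ _ (by omega), if_neg (by omega)]
        exact hint i hi1 hi2 j hj1 hj2
      · intro j hj1 hj2
        rw [tabGet_tabSet _ _ _ _ _ _ (by omega)]
        by_cases hjn : j = n+1
        · subst hjn
          rw [if_pos ⟨rfl, rfl, by omega⟩, hTval]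
        · rw [if_neg (by tauto)]
          exact hrowp j hj1 (by omega)
    }

lemma phase2 (l1 l2 : List Int) (N : Nat) (t : List (List Int)) (ht : Inv2 l1 l2 N 0 t) :
    ∀ m, m ≤ N →
      Inv2 l1 l2 N m ((PySem.List.pyRange 1 ((m:Int)+1) 1).foldl (pvStep2 l1 l2 (N:Int)) t) := by
  intro m
  induction m with
  | zero =>
    intro _
    rw [show (((0:Nat):Int)+1) = 1 by norm_num, PySem.List.pyRange_one_eq_nil le_rfl]
    exact ht
  | succ m ih =>
    intro hm
    have hmN : m < N := by omega
    have inv := ih (by omega)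
    set t' := (PySem.List.pyRange 1 ((m:Int)+1) 1).foldl (pvStep2 l1 l2 (N:Int)) t with hts
    have hpeel : PySem.List.pyRange 1 (((m+1:Nat):Int)+1) 1
        = PySem.List.pyRange 1 ((m:Int)+1) 1 ++ [(m:Int)+1] := by
      rw [show (((m+1:Nat):Int)+1) = ((m:Int)+1)+1 by push_cast; ring]
      exact PySem.List.pyRange_one_succ_right (by omega)
    rw [hpeel, List.foldl_append, List.foldl_cons, List.foldl_nil, ← hts]
    unfold pvStep2
    obtain ⟨⟨hlen, hrow, h0j, hi0, hint⟩, hfill⟩ := phase2_inner l1 l2 N m hmN t' inv N le_rfl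
    refine ⟨hlen, hrow, h0j, hi0, ?_⟩
    intro i hi1 hi2 j hj1 hj2
    by_cases him : i = m+1
    · subst him; exact hfill j hj1 hj2
    · exact hint i hi1 (by omega) j hj1 hj2

lemma pyGetD_neg_one_getD {α : Type} (xs : List α) (d : α) (n : Nat) (h : xs.length = n+1) :
    PySem.List.pyGetD xs (-1) d = xs.getD n d := by
  have hne : xs ≠ [] := by intro h0; rw [h0] at h; simp at h
  rw [PySem.List.pyGetD_neg_one _ _ hne, List.getLast_eq_getElem,
    List.getD_eq_getElem _ _ (by omega)]
  simp [h]

lemma bridgeA (l1 l2 : List Int) (N : Nat) (o1 o2 : Int) :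
    func l1 l2 (N:Int) o1 o2 = T l1 l2 N N N := by
  have hInit : (PySem.List.pyRange 0 ((N:Int)+1) 1).map
      (fun _ => List.replicate ((N:Int)+1).toNat (0:Int))
      = List.replicate (N+1) (List.replicate (N+1) (0:Int)) := by
    have h1 : ((N:Int)+1).toNat = N+1 := by omega
    rw [h1]
    apply List.eq_replicate_iff.mpr
    constructor
    · rw [List.length_map, PySem.List.length_pyRange_one]; omega
    · intro b hb
      simp only [List.mem_map] at hb
      obtain ⟨_, _, hb⟩ := hb; exact hb.symm
  simp only [func]
  rw [hInit]
  obtain ⟨hlen1, hrow1, h0j1, hi01⟩ := phase1 l1 l2 N N le_rfl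
  set t1 := (PySem.List.pyRange 1 ((N:Int)+1) 1).foldl (pvStep1 l1 l2)
    (List.replicate (N+1) (List.replicate (N+1) (0:Int))) with ht1
  have hInv20 : Inv2 l1 l2 N 0 t1 := by
    exact ⟨hlen1, hrow1, h0j1, hi01, fun i hi1 hi2 => by omega⟩
  obtain ⟨hlen2, hrow2, h0j2, hi02, hint2⟩ := phase2 l1 l2 N t1 hInv20 N le_rfl
  set t2 := (PySem.List.pyRange 1 ((N:Int)+1) 1).foldl (pvStep2 l1 l2 (N:Int)) t1 with ht2
  have hrowN : (t2.getD N []).length = N+1 := by rw [hrow2 N, if_pos (by omega)]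
  have e1 : pvGet t2 (-1) (-1) = tabGet t2 N N := by
    unfold pvGet tabGet
    rw [pyGetD_neg_one_getD t2 [] N hlen2, pyGetD_neg_one_getD _ _ N hrowN]
  rw [e1]
  rcases Nat.eq_zero_or_pos N with h0 | hpos
  · subst h0; exact hi02 0 le_rfl
  · exact hint2 N hpos le_rfl N hpos le_rfl

lemma altGo_eq_S (l1 l2 : List Int) : ∀ (k : Nat) (total : Int),
    altGo l1 l2 total k = total + S l1 l2 k := by
  intro k
  induction k with
  | zero => intro total; simp [altGo, S]
  | succ k ih =>
    intro total
    rw [show altGo l1 l2 total (k+1)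
        = altGo l1 l2 (total + max (PySem.List.pyGetD l1 ((k:Int)+1-1) 0)
            (PySem.List.pyGetD l2 ((k:Int)+1-1) 0)) k from rfl, ih, S_succ,
      show (k:Int)+1-1 = ((k:Nat):Int) by ring,
      PySem.List.pyGetD_natCast, PySem.List.pyGetD_natCast]
    ring

lemma bridgeB (l1 l2 : List Int) (N : Nat) (o1 o2 : Int)
    (h1 : N ≤ l1.length) (h2 : N ≤ l2.length) :
    func_alt l1 l2 (N:Int) o1 o2 = S l1 l2 N := by
  simp only [func_alt, Int.toNat_natCast]
  rw [altGo_eq_S]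
  ring

-- ===== VERDICT (by name: the statement is the Claim_ definition above) =====
theorem func_spec : Claim_equal_func := by
  intro l1 l2 o o1 o2 _hd hpre
  obtain ⟨h0, h1, h2⟩ := hpre
  unfold Spec_func
  have ho : o = ((o.toNat : Nat) : Int) := (Int.toNat_of_nonneg h0).symm
  rw [ho, bridgeA, bridgeB, T_diag_eq_S] <;> omega
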